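-- pv_equiv track=rewrite | github.com/jssam/Hactoberfest2021_projects | python project/tic_tac_toe.game.py | check
-- ===== SOURCE A (Python) =====
-- from itertools import permutations
--
-- def check(clkvals, rescombs):
--     playArr=[]
--     combi = permutations(clkvals, 3)
--
--     for c in list(combi):
--         tt=''.join(c)
--         playArr.append(tt)
--
--     for p in playArr:
--         if(p in rescombs):
--
--             return True
-- ===== SOURCE B (Python) =====
-- def _enough(cnt, r1, r2, r3):
--     # can we pick three DISTINCT clicked cells whose values are r1, r2, r3?
--     if r1 == r2 == r3:
--         return cnt.get(r1, 0) >= 3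
--     if r1 == r2:
--         return cnt.get(r1, 0) >= 2 and cnt.get(r3, 0) >= 1
--     if r1 == r3:
--         return cnt.get(r1, 0) >= 2 and cnt.get(r2, 0) >= 1
--     if r2 == r3:
--         return cnt.get(r2, 0) >= 2 and cnt.get(r1, 0) >= 1
--     return cnt.get(r1, 0) >= 1 and cnt.get(r2, 0) >= 1 and cnt.get(r3, 0) >= 1
--
--
-- def check(clkvals, rescombs):
--     # multiset of clicked values, then split each winning combo into three parts
--     cnt = {}
--     for v in clkvals:
--         cnt[v] = cnt.get(v, 0) + 1
--     for r in rescombs: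
--         L = len(r)
--         for a in range(L + 1):
--             for b in range(a, L + 1):
--                 if _enough(cnt, r[:a], r[a:b], r[b:]):
--                     return True
-- ===== Notes on version B (the rewrite author's own statement) =====
-- stated objective: faster
-- what changed: Instead of enumerating all 3-permutations of clkvals and testing each joined string against rescombs, B builds a count dictionary of clkvals once and, for each winning combo, scans its three-way splits, checking that the multiset of the three parts is available among the clicked values.
import Mathlib
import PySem

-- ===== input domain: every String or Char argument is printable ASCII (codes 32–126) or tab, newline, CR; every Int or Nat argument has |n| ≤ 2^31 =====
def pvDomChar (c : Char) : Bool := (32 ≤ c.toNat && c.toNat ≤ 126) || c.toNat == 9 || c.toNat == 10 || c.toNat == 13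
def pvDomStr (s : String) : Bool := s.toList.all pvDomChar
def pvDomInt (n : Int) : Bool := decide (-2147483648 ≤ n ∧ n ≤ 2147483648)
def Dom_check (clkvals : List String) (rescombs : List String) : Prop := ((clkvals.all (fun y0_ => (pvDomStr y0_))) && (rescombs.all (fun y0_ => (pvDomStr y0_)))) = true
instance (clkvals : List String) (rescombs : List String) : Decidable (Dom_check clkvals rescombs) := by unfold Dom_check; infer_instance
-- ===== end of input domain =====

-- B replaces A's enumeration of all 3-permutations of clkvals by a value-count dictionary
-- of clkvals plus a scan over the three-way splits of each winning combo (objective: faster).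

-- ===== PORT A =====

def aLoop (playArr : List String) (rescombs : List String) : Option Bool :=
  match playArr with
  | [] => none
  | p :: rest => if p ∈ rescombs then some true else aLoop rest rescombs

def check (clkvals : List String) (rescombs : List String) : Option Bool :=
  let combi := PySem.List.permutations clkvals 3
  let playArr := combi.foldl (fun acc c => acc ++ [PySem.Str.join "" c]) []
  aLoop playArr rescombs

-- ===== PORT B =====
-- can three DISTINCT clicked cells carry the values r1, r2, r3?
def enough (cnt : PySem.Dict String Int) (r1 r2 r3 : String) : Bool :=
  if r1 == r2 && r2 == r3 then decide (3 ≤ cnt.getD r1 0)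
  else if r1 == r2 then decide (2 ≤ cnt.getD r1 0) && decide (1 ≤ cnt.getD r3 0)
  else if r1 == r3 then decide (2 ≤ cnt.getD r1 0) && decide (1 ≤ cnt.getD r2 0)
  else if r2 == r3 then decide (2 ≤ cnt.getD r2 0) && decide (1 ≤ cnt.getD r1 0)
  else decide (1 ≤ cnt.getD r1 0) && decide (1 ≤ cnt.getD r2 0) && decide (1 ≤ cnt.getD r3 0)

def tryR (cnt : PySem.Dict String Int) (r : String) : Bool :=
  (PySem.List.pyRange 0 (PySem.Str.len r + 1) 1).any fun a =>
    (PySem.List.pyRange a (PySem.Str.len r + 1) 1).any fun b =>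
      enough cnt (PySem.Str.slice r none (some a)) (PySem.Str.slice r (some a) (some b))
        (PySem.Str.slice r (some b) none)

def bLoop (cnt : PySem.Dict String Int) (rescombs : List String) : Option Bool :=
  match rescombs with
  | [] => none
  | r :: rest => if tryR cnt r then some true else bLoop cnt rest

def check_alt (clkvals : List String) (rescombs : List String) : Option Bool :=
  bLoop (PySem.Dict.counter clkvals) rescombs

-- ===== PRECONDITION & SPEC =====  (A is total: no Pre_)
def Spec_check (clkvals : List String) (rescombs : List String) (out : Option Bool) : Prop := out = check_alt clkvals rescombs
instance (clkvals : List String) (rescombs : List String) (out : Option Bool) : Decidable (Spec_check clkvals rescombs out) := by unfold Spec_check; infer_instance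

-- ===== CLAIM (what is proved, stated in full; the proofs are below) =====
def Claim_equal_check : Prop := ∀ (clkvals : List String) (rescombs : List String), Dom_check clkvals rescombs → Spec_check clkvals rescombs (check clkvals rescombs)

-- ===== LEMMAS AND PROOFS =====

theorem boolext (x y : Bool) (h : x = true ↔ y = true) : x = y := by
  cases x <;> cases y <;> simp_all

theorem aLoop_eq (ps rs : List String) :
    aLoop ps rs = if ps.any (fun p => decide (p ∈ rs)) then some true else none := by
  induction ps with
  | nil => simp [aLoop]
  | cons p rest ih => by_cases h : p ∈ rs <;> simp [aLoop, h, ih]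

theorem bLoop_eq (cnt : PySem.Dict String Int) (rs : List String) :
    bLoop cnt rs = if rs.any (tryR cnt) then some true else none := by
  induction rs with
  | nil => simp [bLoop]
  | cons r rest ih => by_cases h : tryR cnt r <;> simp [bLoop, h, ih]

theorem subperm_of_mem_permutations {α : Type} {xs p : List α} {r : Nat}
    (h : p ∈ PySem.List.permutations xs r) : p.Subperm xs := by
  obtain ⟨-, rest, hperm⟩ := PySem.List.exists_perm_of_mem_permutations r xs p h
  exact List.Subperm.trans ⟨p, List.Perm.refl p, List.sublist_append_left p rest⟩ hperm.subperm

theorem mem_permutations_of_subperm {α : Type} [DecidableEq α] :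
    ∀ (p : List α) (xs : List α), p.Subperm xs → p ∈ PySem.List.permutations xs p.length := by
  intro p
  induction p with
  | nil => intro xs _; simp [PySem.List.permutations_zero]
  | cons v p' ih =>
    intro xs hsub
    have hv : v ∈ xs := hsub.subset (List.mem_cons_self ..)
    cases hidx : List.idxOf? v xs with
    | none => exact absurd hv (List.idxOf?_eq_none_iff.mp hidx)
    | some i =>
      obtain ⟨hilt, hxi, -⟩ := List.idxOf?_eq_some_iff.mp hidx
      have herase : xs.erase v = xs.eraseIdx i := by
        rw [List.erase_eq_eraseIdx, hidx]
      have hperm : xs.Perm (v :: xs.eraseIdx i) := herase ▸ List.perm_cons_erase hv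
      have hsub' : p'.Subperm (xs.eraseIdx i) :=
        (List.subperm_cons v).mp (hsub.trans hperm.subperm)
      have hmem := ih (xs.eraseIdx i) hsub'
      show (v :: p') ∈ PySem.List.permutations xs (p'.length + 1)
      rw [PySem.List.permutations]
      refine List.mem_flatMap.mpr ⟨i, List.mem_range.mpr hilt, ?_⟩
      rw [List.getElem?_eq_getElem hilt, hxi]
      exact List.mem_map.mpr ⟨p', hmem, rfl⟩

theorem mem_perms3_iff (xs p : List String) :
    p ∈ PySem.List.permutations xs 3 ↔
      ∃ s1 s2 s3, p = [s1, s2, s3] ∧ [s1, s2, s3].Subperm xs := by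
  constructor
  · intro h
    have hlen := PySem.List.length_of_mem_permutations h
    match p, hlen with
    | [s1, s2, s3], _ => exact ⟨s1, s2, s3, rfl, subperm_of_mem_permutations h⟩
  · rintro ⟨s1, s2, s3, rfl, hsub⟩
    exact mem_permutations_of_subperm [s1, s2, s3] xs hsub

theorem join3_toList (s1 s2 s3 : String) :
    (PySem.Str.join "" [s1, s2, s3]).toList = s1.toList ++ s2.toList ++ s3.toList := by
  simp [PySem.Str.toList_join, PySem.Chars.join, List.intercalate, List.intersperse]

theorem enough_iff (xs : List String) (s1 s2 s3 : String) :
    enough (PySem.Dict.counter xs) s1 s2 s3 = true ↔ [s1, s2, s3].Subperm xs := by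
  rw [List.subperm_ext_iff]
  have hforall : (∀ x ∈ [s1, s2, s3], List.count x [s1, s2, s3] ≤ List.count x xs) ↔
      (List.count s1 [s1, s2, s3] ≤ List.count s1 xs ∧
       List.count s2 [s1, s2, s3] ≤ List.count s2 xs ∧
       List.count s3 [s1, s2, s3] ≤ List.count s3 xs) := by
    constructor
    · intro h; exact ⟨h s1 (by simp), h s2 (by simp), h s3 (by simp)⟩
    · rintro ⟨ha, hb, hc⟩ x hx
      rcases List.mem_cons.mp hx with rfl | hx
      · exact ha
      rcases List.mem_cons.mp hx with rfl | hx
      · exact hb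
      rcases List.mem_cons.mp hx with rfl | hx
      · exact hc
      · simp at hx
  rw [hforall]
  unfold enough
  by_cases h12 : s1 = s2 <;> by_cases h13 : s1 = s3 <;> by_cases h23 : s2 = s3
  · subst h12; subst h13
    simp [List.count_cons, PySem.Dict.getD_counter] <;> first | omega | tauto
  · exact absurd (h12.symm.trans h13) h23
  · exact absurd (h12.trans h23) h13
  · subst h12
    simp [List.count_cons, PySem.Dict.getD_counter, h23, Ne.symm h23] <;> first | omega | tauto
  · exact absurd (h13.trans h23.symm) h12
  · subst h13
    simp [List.count_cons, PySem.Dict.getD_counter, h12, Ne.symm h12] <;> first | omega | tauto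
  · subst h23
    simp [List.count_cons, PySem.Dict.getD_counter, h12, Ne.symm h12] <;> first | omega | tauto
  · simp [List.count_cons, PySem.Dict.getD_counter, h12, h13, h23,
      Ne.symm h12, Ne.symm h13, Ne.symm h23] <;> first | omega | tauto

theorem tryR_iff (xs : List String) (r : String) :
    tryR (PySem.Dict.counter xs) r = true ↔
      ∃ s1 s2 s3 : String, [s1, s2, s3].Subperm xs ∧
        s1.toList ++ s2.toList ++ s3.toList = r.toList := by
  unfold tryR
  simp only [List.any_eq_true, PySem.List.mem_pyRange_one, PySem.Str.len_eq]
  constructor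
  · rintro ⟨a, ⟨h0a, haL⟩, b, ⟨hab, hbL⟩, henough⟩
    have h0b : (0:Int) ≤ b := le_trans h0a hab
    refine ⟨_, _, _, (enough_iff xs _ _ _).mp henough, ?_⟩
    rw [PySem.Str.toList_slice, PySem.Str.toList_slice, PySem.Str.toList_slice]
    show (PySem.List.slice r.toList none (some a)) ++ (PySem.List.slice r.toList (some a) (some b)) ++ (PySem.List.slice r.toList (some b) none) = r.toList
    rw [PySem.List.slice_to r.toList h0a, PySem.List.slice_from r.toList h0b,
      PySem.List.slice_of_nonneg r.toList h0a h0b (by omega) (by omega)]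
    have hd : List.drop b.toNat r.toList = List.drop (b.toNat - a.toNat) (List.drop a.toNat r.toList) := by
      rw [List.drop_drop]; congr 1; omega
    rw [hd, List.append_assoc, List.take_append_drop, List.take_append_drop]
  · rintro ⟨s1, s2, s3, hsub, hcat⟩
    have hlen : r.toList.length = s1.toList.length + s2.toList.length + s3.toList.length := by
      rw [← hcat, List.length_append, List.length_append]
    refine ⟨(s1.toList.length : Int), ⟨by positivity, by omega⟩,
      ((s1.toList.length + s2.toList.length : Nat) : Int), ⟨by push_cast; omega, by push_cast; omega⟩, ?_⟩
    have hll : s1.toList.length + s2.toList.length = (s1.toList ++ s2.toList).length :=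
      (List.length_append).symm
    have e1 : PySem.Str.slice r none (some (s1.toList.length : Int)) = s1 := by
      apply String.toList_inj.mp
      rw [PySem.Str.toList_slice]
      show PySem.List.slice r.toList none (some (s1.toList.length : Int)) = s1.toList
      rw [PySem.List.slice_to r.toList (by positivity), Int.toNat_natCast, ← hcat,
        List.append_assoc, List.take_left]
    have e3 : PySem.Str.slice r (some ((s1.toList.length + s2.toList.length : Nat) : Int)) none = s3 := by
      apply String.toList_inj.mp
      rw [PySem.Str.toList_slice]
      show PySem.List.slice r.toList (some ((s1.toList.length + s2.toList.length : Nat) : Int)) none = s3.toList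
      rw [PySem.List.slice_from r.toList (by positivity), Int.toNat_natCast, ← hcat, hll,
        List.drop_left]
    have e2 : PySem.Str.slice r (some (s1.toList.length : Int)) (some ((s1.toList.length + s2.toList.length : Nat) : Int)) = s2 := by
      apply String.toList_inj.mp
      rw [PySem.Str.toList_slice]
      show PySem.List.slice r.toList (some (s1.toList.length : Int)) (some ((s1.toList.length + s2.toList.length : Nat) : Int)) = s2.toList
      rw [PySem.List.slice_of_nonneg r.toList (by positivity) (by positivity) (by push_cast; omega) (by push_cast; omega),
        Int.toNat_natCast, Int.toNat_natCast, ← hcat, List.append_assoc, List.drop_left]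
      have hsz : s1.toList.length + s2.toList.length - s1.toList.length = s2.toList.length := by omega
      rw [hsz, List.take_left]
    rw [e1, e2, e3]
    exact (enough_iff xs s1 s2 s3).mpr hsub

-- ===== VERDICT =====
theorem check_spec : Claim_equal_check := by
  intro clkvals rescombs _
  unfold Spec_check
  show aLoop ((PySem.List.permutations clkvals 3).foldl (fun acc c => acc ++ [PySem.Str.join "" c]) []) rescombs
      = bLoop (PySem.Dict.counter clkvals) rescombs
  rw [PySem.List.foldl_append_singleton_eq_map, List.nil_append, aLoop_eq, bLoop_eq]
  suffices hXY : ((PySem.List.permutations clkvals 3).map (PySem.Str.join "")).any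
      (fun p => decide (p ∈ rescombs)) = rescombs.any (tryR (PySem.Dict.counter clkvals)) by
    rw [hXY]
  apply boolext
  simp only [List.any_map, List.any_eq_true, Function.comp_apply, decide_eq_true_eq]
  constructor
  · rintro ⟨c, hc, hin⟩
    obtain ⟨s1, s2, s3, rfl, hsub⟩ := (mem_perms3_iff clkvals c).mp hc
    exact ⟨_, hin, (tryR_iff clkvals _).mpr ⟨s1, s2, s3, hsub, (join3_toList s1 s2 s3).symm⟩⟩
  · rintro ⟨r, hr, htry⟩
    obtain ⟨s1, s2, s3, hsub, hcat⟩ := (tryR_iff clkvals r).mp htry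
    refine ⟨[s1, s2, s3], (mem_perms3_iff clkvals _).mpr ⟨s1, s2, s3, rfl, hsub⟩, ?_⟩
    have hjr : PySem.Str.join "" [s1, s2, s3] = r :=
      String.toList_inj.mp (by rw [join3_toList]; exact hcat)
    rw [hjr]; exact hr
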